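-- pv_equiv track=rewrite | github.com/vlww/psai-2025 | exercises/two_characters_2.py | check_is_alternating
-- ===== SOURCE A (Python) =====
-- def check_is_alternating(s):
--     char1 = s[0]
--     char2 = s[1]
--     for c in range(len(s)):
--         if c%2==0:
--             if s[c] != char1:
--                 return False
--         else:
--             if s[c] != char2:
--                 return False
--     return True
-- ===== SOURCE B (Python) =====
-- def check_is_alternating(s):
--     char1 = s[0]
--     char2 = s[1]
--     pattern = (char1 + char2) * ((len(s) + 1) // 2)
--     return s == pattern[:len(s)]
-- ===== Notes on version B (the rewrite author's own statement) =====
-- stated objective: idiomatic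
-- what changed: Replaces the index loop with %2 branching and early returns by building the expected periodic string (char1+char2 repeated) once and comparing it to s with a single equality test.
import Mathlib
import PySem

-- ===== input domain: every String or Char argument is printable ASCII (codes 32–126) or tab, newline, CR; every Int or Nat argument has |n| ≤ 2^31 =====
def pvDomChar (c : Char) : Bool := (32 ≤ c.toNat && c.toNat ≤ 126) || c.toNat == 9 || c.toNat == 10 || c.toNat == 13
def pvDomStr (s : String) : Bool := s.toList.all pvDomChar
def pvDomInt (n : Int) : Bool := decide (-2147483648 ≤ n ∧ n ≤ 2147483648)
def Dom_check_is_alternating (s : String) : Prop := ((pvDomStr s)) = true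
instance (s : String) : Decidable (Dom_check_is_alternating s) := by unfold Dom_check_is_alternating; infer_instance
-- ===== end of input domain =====

-- B builds the expected periodic string ((char1+char2) repeated, truncated) and compares it to s once,
-- instead of A's index loop with %2 branching and early returns (objective: idiomatic).

-- ===== PORT A =====
-- the 'for c in range(len(s))' loop with its two early returns
def aLoop (cs : List Char) (char1 char2 : Char) : List Int → Bool
  | [] => true
  | c :: rest =>
    if PySem.Int.mod c 2 == 0 then
      if PySem.List.pyGetD cs c ' ' != char1 then false
      else aLoop cs char1 char2 rest
    else
      if PySem.List.pyGetD cs c ' ' != char2 then false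
      else aLoop cs char1 char2 rest

def check_is_alternating (s : String) : Bool :=
  let cs := s.toList
  match PySem.List.pyGet? cs 0, PySem.List.pyGet? cs 1 with
  | some char1, some char2 => aLoop cs char1 char2 (PySem.List.pyRange 0 cs.length 1)
  | _, _ => false  -- IndexError (len < 2): excluded by Pre_

-- ===== PORT B =====
def check_is_alternating_alt (s : String) : Bool :=
  let cs := s.toList
  match PySem.List.pyGet? cs 0 with
  | none => false  -- IndexError (len < 2): excluded by Pre_
  | some char1 =>
    match PySem.List.pyGet? cs 1 with
    | none => false  -- IndexError (len < 2): excluded by Pre_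
    | some char2 =>
      -- pattern = (char1 + char2) * ((len(s) + 1) // 2);  return s == pattern[:len(s)]
      let pattern := (List.replicate (PySem.Int.floordiv ((cs.length : Int) + 1) 2).toNat [char1, char2]).flatten
      cs == PySem.List.slice pattern none (some (cs.length : Int))

-- ===== PRECONDITION & SPEC =====
-- Pre_ excludes strings of length < 2, on which Python A (and B) raise IndexError at s[0]/s[1]
def Pre_check_is_alternating (s : String) : Prop := 2 ≤ s.toList.length
instance (s : String) : Decidable (Pre_check_is_alternating s) := by unfold Pre_check_is_alternating; infer_instance
def pvWitness_check_is_alternating : String := "abab"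

def Spec_check_is_alternating (s : String) (out : Bool) : Prop := out = check_is_alternating_alt s
instance (s : String) (out : Bool) : Decidable (Spec_check_is_alternating s out) := by unfold Spec_check_is_alternating; infer_instance

-- ===== CLAIM (what is proved, stated in full; the proofs are below) =====
def Claim_equal_check_is_alternating : Prop := ∀ (s : String), Dom_check_is_alternating s → Pre_check_is_alternating s → Spec_check_is_alternating s (check_is_alternating s)

-- ===== LEMMAS AND PROOFS =====

-- common characterization: cs alternates with period [c1, c2]
def altChk (cs : List Char) (c1 c2 : Char) : Bool :=
  match cs with
  | [] => true
  | [x] => x == c1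
  | x :: y :: rest => x == c1 && (y == c2 && altChk rest c1 c2)

-- B's pattern comparison computes altChk
theorem lemB (cs : List Char) (c1 c2 : Char) :
    (cs == ((List.replicate (((cs.length + 1) / 2)) [c1, c2]).flatten).take cs.length)
      = altChk cs c1 c2 := by
  fun_induction altChk cs c1 c2 with
  | case1 => simp
  | case2 x => simp [List.take]
  | case3 x y rest ih =>
    have h2 : (rest.length + 1 + 1 + 1) / 2 = (rest.length + 1) / 2 + 1 := by omega
    simp only [List.length_cons, h2, List.replicate_succ, List.flatten_cons]
    simp [ih]

-- A's index loop, started after an even-length prefix, computes altChk of the suffix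
theorem lemA (suf pre : List Char) (c1 c2 : Char) (h : pre.length % 2 = 0) :
    aLoop (pre ++ suf) c1 c2
      (PySem.List.pyRange (pre.length : Int) ((pre ++ suf).length : Int) 1)
      = altChk suf c1 c2 := by
  fun_induction altChk suf c1 c2 generalizing pre with
  | case1 =>
    simp [PySem.List.pyRange_one_eq_nil, aLoop]
  | case2 x =>
    have hlen : ((pre ++ [x]).length : Int) = (pre.length : Int) + 1 := by
      simp only [List.length_append, List.length_cons, List.length_nil]; push_cast; ring
    have hdvd : (2:Int) ∣ (pre.length : Int) := by omega
    have hget : PySem.List.pyGetD (pre ++ [x]) (pre.length : Int) ' ' = x := by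
      rw [PySem.List.pyGetD_natCast]; simp [List.getD]
    rw [hlen, PySem.List.pyRange_one_singleton]
    by_cases hx : x = c1 <;> simp [aLoop, hdvd, hget, hx]
  | case3 x y rest ih =>
    have hsplit : pre ++ x :: y :: rest = (pre ++ [x, y]) ++ rest := by simp
    rw [hsplit]
    have hdvd : (2:Int) ∣ (pre.length : Int) := by omega
    have hndvd : ¬ (2:Int) ∣ ((pre.length : Int) + 1) := by omega
    have hlt1 : (pre.length : Int) < (((pre ++ [x, y]) ++ rest).length : Int) := by
      simp only [List.length_append, List.length_cons, List.length_nil]; push_cast; omega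
    have hlt2 : (pre.length : Int) + 1 < (((pre ++ [x, y]) ++ rest).length : Int) := by
      simp only [List.length_append, List.length_cons, List.length_nil]; push_cast; omega
    rw [PySem.List.pyRange_one_cons hlt1, PySem.List.pyRange_one_cons hlt2]
    have hget1 : PySem.List.pyGetD ((pre ++ [x, y]) ++ rest) (pre.length : Int) ' ' = x := by
      have hassoc : (pre ++ [x, y]) ++ rest = pre ++ (x :: y :: rest) := by simp
      rw [hassoc, PySem.List.pyGetD_natCast]; simp [List.getD]
    have hget2 : PySem.List.pyGetD ((pre ++ [x, y]) ++ rest) ((pre.length : Int) + 1) ' ' = y := by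
      have hc : (pre.length : Int) + 1 = ((pre.length + 1 : Nat) : Int) := by push_cast; ring
      have hassoc : (pre ++ [x, y]) ++ rest = (pre ++ [x]) ++ (y :: rest) := by simp
      rw [hc, hassoc, PySem.List.pyGetD_natCast, List.getD]
      rw [List.getElem?_append_right (by simp)]
      simp
    have harg : (pre.length : Int) + 1 + 1 = (((pre ++ [x, y]).length : Nat) : Int) := by
      simp only [List.length_append, List.length_cons, List.length_nil]; push_cast; ring
    rw [harg]
    have ih' := ih (pre ++ [x, y]) (by simp [List.length_append]; omega)
    simp only [aLoop, hget1, hget2, ih']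
    by_cases hx : x = c1 <;> by_cases hy : y = c2 <;>
      simp [hx, hy, hdvd, hndvd]

-- ===== VERDICT (by name: the statement is the Claim_ definition above) =====
theorem check_is_alternating_spec : Claim_equal_check_is_alternating := by
  intro s _ hpre
  unfold Pre_check_is_alternating at hpre
  unfold Spec_check_is_alternating check_is_alternating check_is_alternating_alt
  rcases hcs : s.toList with _ | ⟨a, _ | ⟨b, rest⟩⟩
  · rw [hcs] at hpre; simp at hpre
  · rw [hcs] at hpre; simp at hpre
  · have hg0 : PySem.List.pyGet? (a :: b :: rest) (0 : Int) = some a :=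
      PySem.List.pyGet?_zero_cons _ _
    have hg1 : PySem.List.pyGet? (a :: b :: rest) (1 : Int) = some b := by
      rw [show (1:Int) = ((0:Nat):Int) + 1 by norm_num, PySem.List.pyGet?_cons_succ,
        PySem.List.pyGet?_natCast]
      simp
    simp only [hg0, hg1]
    have hA := lemA (a :: b :: rest) [] a b (by simp)
    simp only [List.nil_append, List.length_nil, Nat.cast_zero] at hA
    have hfd : PySem.Int.floordiv (((a :: b :: rest).length : Int) + 1) 2
        = (((a :: b :: rest).length + 1) / 2 : Nat) := by
      rw [show (((a :: b :: rest).length : Int) + 1) = (((a :: b :: rest).length + 1 : Nat) : Int) by push_cast; ring]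
      exact_mod_cast PySem.Int.floordiv_natCast ((a :: b :: rest).length + 1) 2
    have hsl : PySem.List.slice
        ((List.replicate ((((a :: b :: rest).length + 1) / 2)) [a, b]).flatten)
        none (some ((a :: b :: rest).length : Int))
        = ((List.replicate ((((a :: b :: rest).length + 1) / 2)) [a, b]).flatten).take (a :: b :: rest).length :=
      PySem.List.slice_to_natCast _ _
    rw [hA, hfd, Int.toNat_natCast, hsl, lemB (a :: b :: rest) a b]
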